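-- pv_equiv track=rewrite | github.com/SandraFer/AoC2020 | day06.py | number_of_unanimous_yes
-- ===== SOURCE A (Python) =====
-- def single_answers(a_str):
--     return set(a_str.replace(';', ''))
--
-- def number_of_unanimous_yes(a_str):
--     entries = a_str.split(';')
--     answers = single_answers(a_str)
--     in_all = []
--     for a in answers:
--         gotit = [a in e for e in entries]
--         if False not in gotit:
--             in_all.append(a)
--     return len(in_all)
-- ===== SOURCE B (Python) =====
-- def number_of_unanimous_yes(a_str):
--     groups = a_str.split(';')
--     common = set(groups[0])
--     for g in groups[1:]:
--         common &= set(g)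
--     return len(common)
-- ===== Notes on version B (the rewrite author's own statement) =====
-- stated objective: simpler
-- what changed: Replaces the per-character scan over all entries (build the char universe, then test each char against every group) with a single fold intersecting the groups' character sets, returning the size of the intersection.
import Mathlib
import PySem

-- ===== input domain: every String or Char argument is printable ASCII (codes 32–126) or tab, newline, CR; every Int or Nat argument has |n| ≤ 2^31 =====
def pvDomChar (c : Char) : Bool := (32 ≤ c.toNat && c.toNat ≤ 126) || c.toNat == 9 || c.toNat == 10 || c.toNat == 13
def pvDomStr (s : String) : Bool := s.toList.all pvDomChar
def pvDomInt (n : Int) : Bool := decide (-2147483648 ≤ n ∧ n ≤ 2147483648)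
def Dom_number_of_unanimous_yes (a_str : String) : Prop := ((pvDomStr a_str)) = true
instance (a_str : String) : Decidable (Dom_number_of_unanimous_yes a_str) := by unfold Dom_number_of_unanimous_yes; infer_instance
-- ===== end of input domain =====

-- B replaces A's per-character scan over all entries with one fold intersecting the groups' character sets.


-- ===== PORT A =====
-- helper single_answers: set(a_str.replace(';', ''))
def single_answers (a_str : String) : PySem.Set Char :=
  PySem.Set.ofList (PySem.Chars.replace a_str.toList [';'] [])

def number_of_unanimous_yes (a_str : String) : Int :=
  let entries := PySem.Chars.splitOn a_str.toList [';']
  let answers := single_answers a_str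
  let in_all := answers.foldl (fun acc a =>
      let gotit := entries.map (fun e => PySem.Chars.isIn [a] e)
      if !(gotit.contains false) then acc ++ [a] else acc) ([] : List Char)
  (in_all.length : Int)

-- ===== PORT B =====
def number_of_unanimous_yes_alt (a_str : String) : Int :=
  match PySem.Chars.splitOn a_str.toList [';'] with
  | [] => 0   -- unreachable: str.split always yields at least one piece
  | g :: rest =>
    let common := rest.foldl (fun acc e => PySem.Set.inter acc (PySem.Set.ofList e))
      (PySem.Set.ofList g)
    (PySem.Set.len common : Int)

-- ===== PRECONDITION & SPEC =====
def Spec_number_of_unanimous_yes (a_str : String) (out : Int) : Prop := out = number_of_unanimous_yes_alt a_str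
instance (a_str : String) (out : Int) : Decidable (Spec_number_of_unanimous_yes a_str out) := by unfold Spec_number_of_unanimous_yes; infer_instance

-- ===== CLAIM (what is proved, stated in full; the proofs are below) =====
def Claim_equal_number_of_unanimous_yes : Prop := ∀ (a_str : String), Dom_number_of_unanimous_yes a_str → Spec_number_of_unanimous_yes a_str (number_of_unanimous_yes a_str)

-- ===== LEMMAS AND PROOFS =====

-- s.replace(';', '') keeps, in order, exactly the characters other than ';'
theorem replace_go_semi (s : List Char) : ∀ (fuel : Nat) (acc : List Char),
    s.length ≤ fuel →
    PySem.Chars.replace.go [';'] [] fuel s acc = acc.reverse ++ s.filter (fun c => !(c == ';')) := by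
  induction s with
  | nil =>
      intro fuel acc _
      cases fuel <;> simp [PySem.Chars.replace.go]
  | cons c t ih =>
      intro fuel acc hf
      cases fuel with
      | zero => simp at hf
      | succ f =>
          by_cases hc : c = ';'
          · subst hc
            simp [PySem.Chars.replace.go, List.isPrefixOf, ih f acc (by simpa using hf)]
          · have hb : ((';' : Char) == c) = false := by simp [BEq.beq]; exact fun h => hc h.symm
            simp [PySem.Chars.replace.go, List.isPrefixOf, hb,
              ih f (c :: acc) (by simpa using hf), hc]

theorem replace_semi (s : List Char) :
    PySem.Chars.replace s [';'] [] = s.filter (fun c => !(c == ';')) := by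
  simp [PySem.Chars.replace, replace_go_semi s s.length [] (le_refl _)]

-- split never returns the empty list
theorem splitOn_go_ne_nil (s : List Char) : ∀ (fuel : Nat) (cur : List Char) (acc : List (List Char)),
    PySem.Chars.splitOn.go [';'] fuel s cur acc ≠ [] := by
  induction s with
  | nil => intro fuel cur acc; cases fuel <;> simp [PySem.Chars.splitOn.go]
  | cons c t ih =>
      intro fuel cur acc
      cases fuel with
      | zero => simp [PySem.Chars.splitOn.go]
      | succ f =>
          by_cases hp : List.isPrefixOf [';'] (c :: t) = true
          · simp [PySem.Chars.splitOn.go, hp, ih]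
          · simp [PySem.Chars.splitOn.go, hp, ih]

-- joining the pieces of split(';') gives the characters other than ';'
theorem splitOn_go_flatten (s : List Char) : ∀ (fuel : Nat) (cur : List Char) (acc : List (List Char)),
    s.length ≤ fuel →
    (PySem.Chars.splitOn.go [';'] fuel s cur acc).flatten
      = acc.reverse.flatten ++ cur.reverse ++ s.filter (fun c => !(c == ';')) := by
  induction s with
  | nil =>
      intro fuel cur acc _
      cases fuel <;> simp [PySem.Chars.splitOn.go]
  | cons c t ih =>
      intro fuel cur acc hf
      cases fuel with
      | zero => simp at hf
      | succ f =>
          by_cases hc : c = ';'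
          · subst hc
            simp [PySem.Chars.splitOn.go, List.isPrefixOf,
              ih f [] (cur.reverse :: acc) (by simpa using hf)]
          · have hb : ((';' : Char) == c) = false := by simp [BEq.beq]; exact fun h => hc h.symm
            simp [PySem.Chars.splitOn.go, List.isPrefixOf, hb,
              ih f (c :: cur) acc (by simpa using hf), hc]

theorem splitOn_flatten (s : List Char) :
    (PySem.Chars.splitOn s [';']).flatten = s.filter (fun c => !(c == ';')) := by
  simp [PySem.Chars.splitOn, splitOn_go_flatten s (s.length + 1) [] [] (by omega)]

-- membership in B's intersection fold
theorem mem_inter_foldl (rest : List (List Char)) : ∀ (init : PySem.Set Char) (x : Char),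
    x ∈ rest.foldl (fun acc e => PySem.Set.inter acc (PySem.Set.ofList e)) init
      ↔ x ∈ init ∧ ∀ e ∈ rest, x ∈ e := by
  induction rest with
  | nil => intro init x; simp
  | cons e es ih =>
      intro init x
      simp only [List.foldl_cons, ih, PySem.Set.mem_inter, PySem.Set.mem_ofList, List.mem_cons]
      constructor
      · rintro ⟨⟨hi, he⟩, hall⟩
        exact ⟨hi, by rintro e' (rfl | h'); exacts [he, hall e' h']⟩
      · rintro ⟨hi, hall⟩
        exact ⟨⟨hi, hall e (Or.inl rfl)⟩, fun e' h' => hall e' (Or.inr h')⟩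

theorem nodup_inter_foldl (rest : List (List Char)) : ∀ (init : PySem.Set Char),
    init.Nodup → (rest.foldl (fun acc e => PySem.Set.inter acc (PySem.Set.ofList e)) init).Nodup := by
  induction rest with
  | nil => intro init h; simpa using h
  | cons e es ih => intro init h; exact ih _ (PySem.Set.nodup_inter _ _ h)

-- A's membership test "False not in [a in e for e in entries]" says: a is in every entry
theorem gotit_iff (entries : List (List Char)) (a : Char) :
    (!((entries.map (fun e => PySem.Chars.isIn [a] e)).contains false)) = true
      ↔ ∀ e ∈ entries, a ∈ e := by
  simp [PySem.Chars.isIn_iff_infix, List.singleton_infix_iff]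

-- ===== VERDICT (by name: the statement is the Claim_ definition above) =====
theorem foldA (entries : List (List Char)) (xs : List Char) (acc : List Char) :
    xs.foldl (fun acc a =>
        let gotit := entries.map (fun e => PySem.Chars.isIn [a] e)
        if !(gotit.contains false) then acc ++ [a] else acc) acc
      = acc ++ xs.filter (fun a => !((entries.map (fun e => PySem.Chars.isIn [a] e)).contains false)) := by
  simpa using PySem.List.foldl_append_if
    (fun a => !((entries.map (fun e => PySem.Chars.isIn [a] e)).contains false)) (fun a => a) xs acc

theorem number_of_unanimous_yes_spec : Claim_equal_number_of_unanimous_yes := by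
  intro a_str _
  unfold Spec_number_of_unanimous_yes number_of_unanimous_yes number_of_unanimous_yes_alt single_answers
  cases h : PySem.Chars.splitOn a_str.toList [';'] with
  | nil => exact absurd (by simpa [PySem.Chars.splitOn] using h) (splitOn_go_ne_nil _ _ _ _)
  | cons g rest =>
      dsimp only
      rw [foldA (g :: rest)]
      have hflat : g ++ rest.flatten = a_str.toList.filter (fun c => !(c == ';')) := by
        have := splitOn_flatten a_str.toList
        rw [h] at this; simpa using this
      have hA : ∀ x : Char,
          x ∈ (PySem.Set.ofList (PySem.Chars.replace a_str.toList [';'] [])).filter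
              (fun a => !(((g :: rest).map (fun e => PySem.Chars.isIn [a] e)).contains false))
            ↔ x ∈ g ∧ ∀ e ∈ rest, x ∈ e := by
        intro x
        simp only [List.mem_filter, PySem.Set.mem_ofList, replace_semi, gotit_iff, List.mem_cons]
        constructor
        · rintro ⟨_, hall⟩
          exact ⟨hall g (Or.inl rfl), fun e he => hall e (Or.inr he)⟩
        · rintro ⟨hg, hrest⟩
          have hx : x ∈ List.filter (fun c => !(c == ';')) a_str.toList := by
            rw [← hflat]; exact List.mem_append.mpr (Or.inl hg)
          have hx' := List.mem_filter.mp hx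
          refine ⟨hx', ?_⟩
          rintro e (rfl | he)
          · exact hg
          · exact hrest e he
      have hperm : ((PySem.Set.ofList (PySem.Chars.replace a_str.toList [';'] [])).filter
          (fun a => !(((g :: rest).map (fun e => PySem.Chars.isIn [a] e)).contains false))).Perm
          (rest.foldl (fun acc e => PySem.Set.inter acc (PySem.Set.ofList e)) (PySem.Set.ofList g)) := by
        rw [List.perm_ext_iff_of_nodup
          (List.Nodup.filter _ (PySem.Set.nodup_ofList _))
          (nodup_inter_foldl rest _ (PySem.Set.nodup_ofList g))]
        intro x
        rw [hA x, mem_inter_foldl rest _ x, PySem.Set.mem_ofList]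
      simp only [List.nil_append, PySem.Set.len, hperm.length_eq]
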